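-- pv_equiv track=rewrite | github.com/bioinformaticsguy/GPML | prep.py | find_duplicate_values
-- ===== SOURCE A (Python) =====
-- def find_duplicate_values(dictionary):
--     value_to_keys = {}
--     duplicates = {}
--
--     for key, value in dictionary.items():
--         if value in value_to_keys:
--             value_to_keys[value].append(key)
--         else:
--             value_to_keys[value] = [key]
--
--     for value, keys in value_to_keys.items():
--         if len(keys) > 1:
--             duplicates[value] = keys
--
--     return duplicates
-- ===== SOURCE B (Python) =====
-- def find_duplicate_values(dictionary):
--     items = list(dictionary.items())
--     duplicates = {}
--     for _, value in items:
--         if value not in duplicates: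
--             keys = [k for k, v in items if v == value]
--             if len(keys) > 1:
--                 duplicates[value] = keys
--     return duplicates
-- ===== Notes on version B (the rewrite author's own statement) =====
-- stated objective: alternative
-- what changed: B drops A's hash-grouping pass entirely: it walks the items once and, for each value not yet in the result, rescans the whole item list to collect that value's keys, keeping the group only if it has at least two keys (brute-force nested scan instead of building a value-to-keys dict and filtering it).
import Mathlib
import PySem

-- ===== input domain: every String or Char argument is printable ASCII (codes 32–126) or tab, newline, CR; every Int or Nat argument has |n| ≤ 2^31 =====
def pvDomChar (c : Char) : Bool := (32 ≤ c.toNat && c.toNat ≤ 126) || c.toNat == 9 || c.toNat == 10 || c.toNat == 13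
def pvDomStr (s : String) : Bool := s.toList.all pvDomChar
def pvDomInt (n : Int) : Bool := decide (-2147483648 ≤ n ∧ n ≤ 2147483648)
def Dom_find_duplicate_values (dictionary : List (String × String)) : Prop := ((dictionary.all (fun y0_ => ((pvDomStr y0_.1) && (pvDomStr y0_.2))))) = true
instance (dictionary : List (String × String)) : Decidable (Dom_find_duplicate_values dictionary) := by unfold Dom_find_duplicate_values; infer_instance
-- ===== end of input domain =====

-- B replaces A's build-value-to-keys-dict-then-filter algorithm by a dict-free brute-force nested scan:
-- for each item whose value is not yet in the result it rescans the whole item list for that value's keys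
-- and keeps the group iff it has ≥ 2 keys; same result, different algorithm (objective: alternative, not faster).

-- ===== PORT A =====
def find_duplicate_values (dictionary : List (String × String)) : List (String × List String) :=
  let value_to_keys : PySem.Dict String (List String) :=
    dictionary.foldl (fun d kv =>
      if d.contains kv.2 then d.modify kv.2 [] (fun ks => ks ++ [kv.1])  -- value_to_keys[value].append(key): in-place append = modify
      else d.insert kv.2 [kv.1]) PySem.Dict.empty
  let duplicates : PySem.Dict String (List String) :=
    value_to_keys.items.foldl (fun dup p =>
      if p.2.length > 1 then dup.insert p.1 p.2 else dup) PySem.Dict.empty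
  duplicates.items

-- ===== PORT B =====
def find_duplicate_values_alt (dictionary : List (String × String)) : List (String × List String) :=
  (dictionary.foldl (fun (dup : PySem.Dict String (List String)) kv =>
    if dup.contains kv.2 then dup    -- value already in duplicates: skip
    else
      let keys := (dictionary.filter (fun q => q.2 == kv.2)).map (fun q => q.1)  -- [k for k, v in items if v == value]
      if keys.length > 1 then dup.insert kv.2 keys else dup)
    PySem.Dict.empty).items

-- ===== PRECONDITION & SPEC =====
def Spec_find_duplicate_values (dictionary : List (String × String)) (out : List (String × List String)) : Prop := out = find_duplicate_values_alt dictionary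
instance (dictionary : List (String × String)) (out : List (String × List String)) : Decidable (Spec_find_duplicate_values dictionary out) := by unfold Spec_find_duplicate_values; infer_instance

-- ===== CLAIM (what is proved, stated in full; the proofs are below) =====
def Claim_equal_find_duplicate_values : Prop := ∀ (dictionary : List (String × String)), Dom_find_duplicate_values dictionary → Spec_find_duplicate_values dictionary (find_duplicate_values dictionary)

-- ===== LEMMAS AND PROOFS =====

-- keys of entries carrying value v, in order (what either side stores for a duplicated value v)
def pvGrp (dictionary : List (String × String)) (v : String) : List String :=
  (dictionary.filter (fun q => q.2 == v)).map (fun q => q.1)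

-- the grouping dict A builds
def pvGroup (l : List (String × String)) : PySem.Dict String (List String) :=
  l.foldl (fun d kv => d.modify kv.2 [] (fun ks => ks ++ [kv.1])) PySem.Dict.empty

lemma pvGroup_getD (l : List (String × String)) (v : String) :
    (pvGroup l).getD v [] = pvGrp l v := by
  unfold pvGroup pvGrp
  rw [show l.foldl (fun d kv => d.modify kv.2 [] (fun ks => ks ++ [kv.1])) PySem.Dict.empty
      = (l.map (fun p => (p.2, p.1))).foldl (fun d p => d.modify p.1 [] (fun ks => ks ++ [p.2])) PySem.Dict.empty
      from (List.foldl_map (f := fun p : String × String => (p.2, p.1))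
        (g := fun (d : PySem.Dict String (List String)) (p : String × String) => d.modify p.1 [] (fun ks => ks ++ [p.2]))).symm]
  rw [PySem.Dict.getD_foldl_modify_append]
  simp [List.filter_map, List.map_map, Function.comp_def]

lemma pvGroup_keys (l : List (String × String)) :
    (pvGroup l).keys = PySem.Set.ofList (l.map (fun q => q.2)) := by
  unfold pvGroup
  have h := PySem.Dict.keys_foldl_modify_key (l := l) (key := fun kv : String × String => kv.2)
    (d0 := ([] : List String)) (f := fun _ kv => fun ks => ks ++ [kv.1]) (d := PySem.Dict.empty)
  simpa [PySem.Dict.keys_empty, PySem.Set.update, PySem.Set.ofList, PySem.Set.empty] using h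

lemma pvGroup_keys_nodup (l : List (String × String)) : (pvGroup l).keys.Nodup := by
  rw [pvGroup_keys]; exact PySem.Set.nodup_ofList _

lemma pvGroup_items (l : List (String × String)) :
    (pvGroup l).items = (PySem.Set.ofList (l.map (fun q => q.2))).map (fun v => (v, pvGrp l v)) := by
  rw [PySem.Dict.items_eq_map_keys _ (pvGroup_keys_nodup l) []]
  rw [pvGroup_keys]
  exact List.map_congr_left (fun v _ => by rw [pvGroup_getD])

lemma grp_length (dictionary : List (String × String)) (v : String) :
    (pvGrp dictionary v).length = (dictionary.map (fun q => q.2)).count v := by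
  simp [pvGrp, List.count_eq_countP, List.countP_eq_length_filter, List.filter_map, Function.comp_def]

-- A's closed form
lemma A_closed (dictionary : List (String × String)) :
    find_duplicate_values dictionary
      = ((PySem.Set.ofList (dictionary.map (fun q => q.2))).filter
          (fun v => decide (1 < (dictionary.map (fun q => q.2)).count v))).map
          (fun v => (v, pvGrp dictionary v)) := by
  unfold find_duplicate_values
  show (List.foldl (fun dup p => if p.2.length > 1 then dup.insert p.1 p.2 else dup) PySem.Dict.empty
      (List.foldl (fun d kv => if d.contains kv.2 then d.modify kv.2 [] (fun ks => ks ++ [kv.1])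
        else d.insert kv.2 [kv.1]) PySem.Dict.empty dictionary).items).items = _
  rw [show dictionary.foldl (fun d kv =>
        if d.contains kv.2 then d.modify kv.2 [] (fun ks => ks ++ [kv.1])
        else d.insert kv.2 [kv.1]) PySem.Dict.empty = pvGroup dictionary from by
    unfold pvGroup
    apply PySem.List.foldl_congr_mem
    intro acc kv _
    by_cases h : acc.contains kv.2
    · simp [h]
    · simp only [h, Bool.false_eq_true, if_neg, not_false_iff]
      unfold PySem.Dict.modify
      rw [PySem.Dict.getD_of_not_contains _ _ (by simpa using h)]
      simp]
  rw [show (fun (dup : PySem.Dict String (List String)) (p : String × List String) =>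
        if p.2.length > 1 then dup.insert p.1 p.2 else dup)
      = (fun dup p => if (fun q : String × List String => decide (1 < q.2.length)) p = true
          then dup.insert p.1 p.2 else dup) from by
    funext dup p
    simp only [decide_eq_true_eq, gt_iff_lt]]
  rw [← List.foldl_filter (p := fun q : String × List String => decide (1 < q.2.length))
    (f := fun (dup : PySem.Dict String (List String)) (p : String × List String) => dup.insert p.1 p.2)]
  have hnd : (((pvGroup dictionary).items.filter
      (fun q : String × List String => decide (1 < q.2.length))).map (fun p => p.1)).Nodup := by
    refine List.Nodup.sublist (List.Sublist.map _ List.filter_sublist) ?_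
    have := pvGroup_keys_nodup dictionary
    simpa [PySem.Dict.keys] using this
  rw [PySem.Dict.items_foldl_insert_fresh
        ((pvGroup dictionary).items.filter (fun q : String × List String => decide (1 < q.2.length)))
        (fun p => p.1) (fun p => p.2) PySem.Dict.empty
        (fun a _ => PySem.Dict.contains_empty _) hnd]
  rw [show (PySem.Dict.empty : PySem.Dict String (List String)).items = [] from rfl, List.nil_append]
  rw [show (fun (a : String × List String) => (a.1, a.2)) = id from by funext a; simp]
  rw [List.map_id]
  rw [pvGroup_items]
  rw [List.filter_map]
  congr 1
  apply List.filter_congr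
  intro v _
  simp [Function.comp, grp_length]

-- B's fold, abstracted to a fold over the value list (the inserted group depends only on the value)
def pvStepB (dictionary : List (String × String)) (dup : PySem.Dict String (List String)) (v : String) :
    PySem.Dict String (List String) :=
  if dup.contains v then dup
  else if (pvGrp dictionary v).length > 1 then dup.insert v (pvGrp dictionary v) else dup

-- loop invariant of B's single pass: the result appends, to dup.items, the groups of the distinct
-- not-yet-present duplicated values of l, in first-occurrence order
lemma foldB_items (dictionary : List (String × String)) (l : List String)
    (dup : PySem.Dict String (List String))
    (hc : ∀ k, dup.contains k = true → decide (1 < (pvGrp dictionary k).length) = true) :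
    (l.foldl (pvStepB dictionary) dup).items
      = dup.items ++ (((PySem.Set.ofList l).filter (fun x => !(PySem.Set.contains dup.keys x))).filter
          (fun v => decide (1 < (pvGrp dictionary v).length))).map
          (fun v => (v, pvGrp dictionary v)) := by
  induction l generalizing dup with
  | nil => simp [PySem.Set.ofList_nil]
  | cons v t ih =>
    rw [List.foldl_cons]
    by_cases hmem : dup.contains v = true
    · have hv : v ∈ dup.keys := (PySem.Dict.contains_iff_mem_keys _ _).mp hmem
      rw [show pvStepB dictionary dup v = dup from by unfold pvStepB; rw [hmem]; simp]
      rw [ih dup hc]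
      congr 2
      rw [PySem.Set.ofList_cons]
      rw [List.filter_cons]
      simp only [PySem.Set.contains_eq_listContains, List.contains_eq_mem, hv, decide_true,
        Bool.not_true, Bool.false_eq_true, if_neg, not_false_iff]
      -- filtering the discard: elements removed by discard are = v, which is excluded by the ∉ keys filter anyway
      rw [show PySem.Set.discard (PySem.Set.ofList t) v
            = (PySem.Set.ofList t).filter (fun x => !(x == v)) from rfl]
      rw [List.filter_filter, List.filter_filter, List.filter_filter]
      apply List.filter_congr
      intro x _
      by_cases hx : x = v
      · subst hx; simp [hv]
      · have hb : (x == v) = false := by simpa using hx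
        simp [hb]
    · have hmemf : dup.contains v = false := by simpa using hmem
      have hv : v ∉ dup.keys := fun h => hmem ((PySem.Dict.contains_iff_mem_keys _ _).mpr h)
      by_cases hlen : (pvGrp dictionary v).length > 1
      · -- duplicated new value: gets inserted (fresh key appends)
        have hstep : pvStepB dictionary dup v = dup.insert v (pvGrp dictionary v) := by
          unfold pvStepB; rw [hmemf]; simp [hlen]
        rw [hstep]
        have hc' : ∀ k, (dup.insert v (pvGrp dictionary v)).contains k = true →
            decide (1 < (pvGrp dictionary k).length) = true := by
          intro k hk
          rw [PySem.Dict.contains_insert] at hk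
          rcases Bool.or_eq_true_iff.mp hk with h | h
          · have : k = v := by simpa using h
            subst this; simpa using hlen
          · exact hc k h
        rw [ih _ hc']
        rw [PySem.Dict.items_insert_of_not_contains _ _ hmemf]
        rw [PySem.Dict.keys_insert_of_not_contains _ _ hmemf]
        rw [List.append_assoc]
        congr 1
        rw [PySem.Set.ofList_cons]
        rw [List.filter_cons]
        simp only [PySem.Set.contains_eq_listContains, List.contains_eq_mem, hv, decide_false,
          Bool.not_false, if_pos]
        rw [List.filter_cons]
        simp only [hlen, decide_true, if_pos, List.map_cons, List.singleton_append]
        congr 2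
        rw [show PySem.Set.discard (PySem.Set.ofList t) v
              = (PySem.Set.ofList t).filter (fun x => !(x == v)) from rfl]
        rw [List.filter_filter, List.filter_filter, List.filter_filter]
        apply List.filter_congr
        intro x _
        by_cases hx : x = v
        · subst hx; simp
        · have hb : (x == v) = false := by simpa using hx
          simp [hb, hx]
      · -- unduplicated new value: skipped, and the cond-filter removes it from the spec list too
        have hstep : pvStepB dictionary dup v = dup := by
          unfold pvStepB; rw [hmemf]; simp [hlen]
        rw [hstep, ih dup hc]
        congr 1
        rw [PySem.Set.ofList_cons]
        rw [List.filter_cons]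
        simp only [PySem.Set.contains_eq_listContains, List.contains_eq_mem, hv, decide_false,
          Bool.not_false, if_pos]
        rw [List.filter_cons]
        simp only [hlen, decide_false, Bool.false_eq_true, if_neg, not_false_iff]
        rw [show PySem.Set.discard (PySem.Set.ofList t) v
              = (PySem.Set.ofList t).filter (fun x => !(x == v)) from rfl]
        rw [List.filter_filter, List.filter_filter, List.filter_filter]
        congr 1
        apply List.filter_congr
        intro x _
        by_cases hx : x = v
        · subst hx; simp [hlen]
        · have hb : (x == v) = false := by simpa using hx
          simp [hb]

-- B's closed form: identical to A's
lemma B_closed (dictionary : List (String × String)) :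
    find_duplicate_values_alt dictionary
      = ((PySem.Set.ofList (dictionary.map (fun q => q.2))).filter
          (fun v => decide (1 < (dictionary.map (fun q => q.2)).count v))).map
          (fun v => (v, pvGrp dictionary v)) := by
  unfold find_duplicate_values_alt
  rw [show (fun (dup : PySem.Dict String (List String)) (kv : String × String) =>
        if dup.contains kv.2 then dup
        else
          let keys := (dictionary.filter (fun q => q.2 == kv.2)).map (fun q => q.1)
          if keys.length > 1 then dup.insert kv.2 keys else dup)
      = (fun dup kv => pvStepB dictionary dup kv.2) from by
    funext dup kv; rfl]
  rw [show dictionary.foldl (fun dup kv => pvStepB dictionary dup kv.2) PySem.Dict.empty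
      = (dictionary.map (fun q => q.2)).foldl (pvStepB dictionary) PySem.Dict.empty
      from (List.foldl_map (f := fun q : String × String => q.2) (g := pvStepB dictionary)).symm]
  rw [foldB_items dictionary _ PySem.Dict.empty
      (fun k hk => absurd hk (by simp [PySem.Dict.contains_empty]))]
  rw [show (PySem.Dict.empty : PySem.Dict String (List String)).items = [] from rfl, List.nil_append]
  rw [show (PySem.Dict.empty : PySem.Dict String (List String)).keys = [] from rfl]
  rw [show ((PySem.Set.ofList (dictionary.map (fun q => q.2))).filter
        (fun x => !(PySem.Set.contains ([] : List String) x)))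
      = PySem.Set.ofList (dictionary.map (fun q => q.2)) from by
    apply List.filter_eq_self.mpr; intro x _; simp [PySem.Set.contains]]
  congr 1
  apply List.filter_congr
  intro v _
  simp [grp_length]

-- ===== VERDICT (by name: the statement is the Claim_ definition above) =====
theorem find_duplicate_values_spec : Claim_equal_find_duplicate_values := by
  intro dictionary _
  unfold Spec_find_duplicate_values
  rw [A_closed, B_closed]
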